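-- pv_equiv track=rewrite | github.com/joana04/Teoria-Computacional | Entrega Final/Planetas/planetasComentado.py | combinar
-- ===== SOURCE A (Python) =====
-- def combinar(combinaciones,n):
-- 	for x in range(0,n+1): # Va cambiando el valor de la primer especie hasta n
-- 		for y in range(0,n+1): # Va cambiando el valor de la segunda especie hasta n
-- 			for z in range(0,n+1): # Va cambiando el valor de la tercer especie hasta n
-- 				if((x+y+z)==n): # Verifica que la combinacion sirva para el n buscado
-- 					if( (x!=0 and y!=0) or (x!=0 and z!=0) or (z!=0 and y!=0) ): # Verifica que la que genero no sea final
-- 						combinaciones.append([x,y,z]) # Guarda la combinacion en el arreglo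
-- 	return combinaciones #Regresa el arreglo con todas las combinaciones para trabajar
-- ===== SOURCE B (Python) =====
-- def combinar(combinaciones, n):
--     # Stage 1: enumerate every nonnegative composition x+y+z = n directly (z = n-x-y).
--     # Stage 2: keep the triples with at most one zero coordinate (drops the "final" states).
--     todos = [[x, y, n - x - y] for x in range(n + 1) for y in range(n + 1 - x)]
--     combinaciones += [t for t in todos if t.count(0) <= 1]
--     return combinaciones
-- ===== Notes on version B (the rewrite author's own statement) =====
-- stated objective: faster
-- what changed: Replaced A's triple nested scan over all (x,y,z) by a staged pipeline: build the full list of compositions x+y+z=n with z computed as n-x-y, then filter it by zero-count (t.count(0) <= 1); intended as faster (O(n^2) vs O(n^3)); a timing run measured B ~37x faster at the largest size both finished (n=4096), unconfirmed at n=16384 where B also timed out.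
import Mathlib
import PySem

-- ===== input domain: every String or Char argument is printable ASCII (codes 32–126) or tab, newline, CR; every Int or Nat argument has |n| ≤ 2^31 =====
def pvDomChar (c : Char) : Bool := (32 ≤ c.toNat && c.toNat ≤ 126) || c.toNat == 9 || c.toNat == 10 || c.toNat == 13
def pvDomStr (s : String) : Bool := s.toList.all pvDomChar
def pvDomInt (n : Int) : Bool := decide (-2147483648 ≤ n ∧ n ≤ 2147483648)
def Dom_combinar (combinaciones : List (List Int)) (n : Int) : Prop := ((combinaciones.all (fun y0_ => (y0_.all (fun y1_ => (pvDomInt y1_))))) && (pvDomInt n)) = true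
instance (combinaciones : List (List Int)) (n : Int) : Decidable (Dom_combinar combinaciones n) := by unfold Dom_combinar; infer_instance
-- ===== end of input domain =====

-- B replaces A's triple nested scan by a staged pipeline: enumerate all compositions
-- x+y+z = n with z computed directly, then filter by zero-count (intended as faster;
-- a timing run measured ~37x at the largest size both programs finished).  Both append
-- to the argument list in place; the equivalence proved is about the return value.

-- ===== PORT A =====
-- triple nested range loop; the two nested ifs are ported as one conjunction with the same else
def combinar (combinaciones : List (List Int)) (n : Int) : List (List Int) :=
  (PySem.List.pyRange 0 (n+1) 1).foldl (fun a1 x =>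
    (PySem.List.pyRange 0 (n+1) 1).foldl (fun a2 y =>
      (PySem.List.pyRange 0 (n+1) 1).foldl (fun a3 z =>
        if (x + y + z = n) ∧ ((x ≠ 0 ∧ y ≠ 0) ∨ (x ≠ 0 ∧ z ≠ 0) ∨ (z ≠ 0 ∧ y ≠ 0)) then
          a3 ++ [[x, y, z]]
        else a3) a2) a1) combinaciones

-- ===== PORT B =====
-- stage 1: the double comprehension 'todos'; stage 2: filter by t.count(0) <= 1 and '+='
def combinar_alt (combinaciones : List (List Int)) (n : Int) : List (List Int) :=
  let todos : List (List Int) :=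
    (PySem.List.pyRange 0 (n+1) 1).flatMap (fun x =>
      (PySem.List.pyRange 0 (n+1-x) 1).map (fun y => [x, y, n - x - y]))
  combinaciones ++ todos.filter (fun t => decide (PySem.List.count t 0 ≤ 1))

-- ===== PRECONDITION & SPEC =====
def Spec_combinar (combinaciones : List (List Int)) (n : Int) (out : List (List Int)) : Prop := out = combinar_alt combinaciones n
instance (combinaciones : List (List Int)) (n : Int) (out : List (List Int)) : Decidable (Spec_combinar combinaciones n out) := by unfold Spec_combinar; infer_instance

-- ===== CLAIM (what is proved, stated in full; the proofs are below) =====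
def Claim_equal_combinar : Prop := ∀ (combinaciones : List (List Int)) (n : Int), Dom_combinar combinaciones n → Spec_combinar combinaciones n (combinar combinaciones n)

-- ===== LEMMAS AND PROOFS =====

-- "at least two of x,y,z nonzero" equals "the triple counts 0 at most once"
theorem pvCount_iff (x y z : Int) :
    ((x ≠ 0 ∧ y ≠ 0) ∨ (x ≠ 0 ∧ z ≠ 0) ∨ (z ≠ 0 ∧ y ≠ 0)) ↔
    PySem.List.count [x, y, z] 0 ≤ 1 := by
  by_cases hx : x = 0 <;> by_cases hy : y = 0 <;> by_cases hz : z = 0 <;>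
    simp [hx, hy, hz, PySem.List.count]

-- filter of an integer range by a predicate true at exactly one point
theorem pvFilter_pyRange (a b z0 : Int) (p : Int → Bool) (hp : ∀ z, p z = true ↔ z = z0) :
    (PySem.List.pyRange a b 1).filter p = if a ≤ z0 ∧ z0 < b then [z0] else [] := by
  induction h : (b - a).toNat generalizing a with
  | zero =>
    rw [PySem.List.pyRange_one_eq_nil (by omega)]
    simp only [List.filter_nil]
    rw [if_neg (by omega)]
  | succ k ih =>
    rw [PySem.List.pyRange_one_cons (by omega)]
    rcases eq_or_ne a z0 with rfl | hne
    · rw [List.filter_cons_of_pos ((hp a).mpr rfl), ih (a+1) (by omega)]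
      rw [if_neg (show ¬(a + 1 ≤ a ∧ a < b) by omega), if_pos (show a ≤ a ∧ a < b by omega)]
    · have hpa : ¬ p a = true := fun hb => hne ((hp a).mp hb)
      rw [List.filter_cons_of_neg (by simpa using hpa), ih (a+1) (by omega)]
      by_cases hz : a + 1 ≤ z0 ∧ z0 < b
      · rw [if_pos hz, if_pos (show a ≤ z0 ∧ z0 < b by omega)]
      · rw [if_neg hz, if_neg (show ¬(a ≤ z0 ∧ z0 < b) by omega)]

-- a flatMap producing at most one element per item is a filter-then-map
theorem pvFlatMap_if {α β : Type} (l : List α) (p : α → Bool) (f : α → β) :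
    l.flatMap (fun y => if p y then [f y] else []) = (l.filter p).map f := by
  induction l with
  | nil => rfl
  | cons a t ih =>
    rw [List.flatMap_cons, List.filter_cons]
    cases hn : p a <;> simp [ih]

-- A's inner z-loop collapses to at most one triple
theorem pvInnerA (n x y : Int) :
    ((PySem.List.pyRange 0 (n+1) 1).filter
        (fun z => decide ((x + y + z = n) ∧ ((x ≠ 0 ∧ y ≠ 0) ∨ (x ≠ 0 ∧ z ≠ 0) ∨ (z ≠ 0 ∧ y ≠ 0))))).map
        (fun z => ([x, y, z] : List Int))
    = if (0 ≤ n - x - y ∧ n - x - y < n + 1) ∧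
          ((x ≠ 0 ∧ y ≠ 0) ∨ (x ≠ 0 ∧ n - x - y ≠ 0) ∨ (n - x - y ≠ 0 ∧ y ≠ 0)) then
        [[x, y, n - x - y]]
      else [] := by
  by_cases hc : (x ≠ 0 ∧ y ≠ 0) ∨ (x ≠ 0 ∧ n - x - y ≠ 0) ∨ (n - x - y ≠ 0 ∧ y ≠ 0)
  · rw [pvFilter_pyRange 0 (n+1) (n - x - y) _
      (by intro z; simp only [decide_eq_true_eq]; constructor
          · rintro ⟨h1, _⟩; omega
          · rintro rfl; exact ⟨by ring, hc⟩)]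
    by_cases hr : 0 ≤ n - x - y ∧ n - x - y < n + 1
    · rw [if_pos hr, if_pos ⟨hr, hc⟩]; rfl
    · rw [if_neg hr, if_neg (by tauto)]; rfl
  · have : ∀ z, ¬ ((x + y + z = n) ∧ ((x ≠ 0 ∧ y ≠ 0) ∨ (x ≠ 0 ∧ z ≠ 0) ∨ (z ≠ 0 ∧ y ≠ 0))) := by
      intro z ⟨h1, h2⟩
      apply hc
      have : z = n - x - y := by omega
      rw [this] at h2; exact h2
    rw [List.filter_eq_nil_iff.mpr (by intro z _; simp only [decide_eq_true_eq]; exact this z)]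
    rw [if_neg (by tauto)]
    rfl

-- filter distributes over flatMap
theorem pvFilter_flatMap {α β : Type} (l : List α) (g : α → List β) (p : β → Bool) :
    (l.flatMap g).filter p = l.flatMap (fun a => (g a).filter p) := by
  induction l with
  | nil => rfl
  | cons a t ih => simp [List.flatMap_cons, List.filter_append, ih]

-- for 0 ≤ x < n+1, A's full y-loop (z collapsed) equals B's per-x filtered row
theorem pvMiddle (n x : Int) (hx : 0 ≤ x ∧ x < n + 1) :
    (PySem.List.pyRange 0 (n+1) 1).flatMap (fun y =>
      if (0 ≤ n - x - y ∧ n - x - y < n + 1) ∧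
          ((x ≠ 0 ∧ y ≠ 0) ∨ (x ≠ 0 ∧ n - x - y ≠ 0) ∨ (n - x - y ≠ 0 ∧ y ≠ 0)) then
        [[x, y, n - x - y]]
      else ([] : List (List Int)))
    = ((PySem.List.pyRange 0 (n+1-x) 1).map (fun y => ([x, y, n - x - y] : List Int))).filter
        (fun t => decide (PySem.List.count t 0 ≤ 1)) := by
  rw [PySem.List.pyRange_one_append 0 (n+1-x) (n + 1) (by omega) (by omega)]
  rw [List.flatMap_append]
  have h2 : (PySem.List.pyRange (n+1-x) (n+1) 1).flatMap (fun y =>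
      if (0 ≤ n - x - y ∧ n - x - y < n + 1) ∧
          ((x ≠ 0 ∧ y ≠ 0) ∨ (x ≠ 0 ∧ n - x - y ≠ 0) ∨ (n - x - y ≠ 0 ∧ y ≠ 0)) then
        [[x, y, n - x - y]]
      else ([] : List (List Int))) = [] := by
    apply List.flatMap_eq_nil_iff.mpr
    intro y hy
    rw [PySem.List.mem_pyRange_one] at hy
    rw [if_neg (by omega)]
  rw [h2, List.append_nil]
  rw [List.filter_map]
  rw [← pvFlatMap_if (PySem.List.pyRange 0 (n+1-x) 1) _ (fun y => ([x, y, n - x - y] : List Int))]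
  apply List.flatMap_congr
  intro y hy
  rw [PySem.List.mem_pyRange_one] at hy
  simp only [Function.comp, decide_eq_true_eq]
  have hr : 0 ≤ n - x - y ∧ n - x - y < n + 1 := by omega
  by_cases hc : (x ≠ 0 ∧ y ≠ 0) ∨ (x ≠ 0 ∧ n - x - y ≠ 0) ∨ (n - x - y ≠ 0 ∧ y ≠ 0)
  · rw [if_pos ⟨hr, hc⟩, if_pos ((pvCount_iff x y (n - x - y)).mp hc)]
  · rw [if_neg (by tauto), if_neg (fun h => hc ((pvCount_iff x y (n - x - y)).mpr h))]

-- ===== VERDICT (by name: the statement is the Claim_ definition above) =====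
theorem combinar_spec : Claim_equal_combinar := by
  intro combinaciones n _
  unfold Spec_combinar combinar combinar_alt
  simp only [PySem.List.foldl_append_ite, PySem.List.foldl_append_eq_flatMap]
  rw [pvFilter_flatMap]
  congr 1
  apply List.flatMap_congr
  intro x hx
  rw [PySem.List.mem_pyRange_one] at hx
  simp only [pvInnerA]
  exact pvMiddle n x hx
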